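-- pv_equiv track=rewrite | github.com/liuzhiliangpc/industry | match_rules_moudle.py | choose_multi_firstcategory
-- ===== SOURCE A (Python) =====
-- def choose_multi_firstcategory(fresult):
--     # 首先选出候选行业中，候选次数最多的行业集合
--     houxuanf = list(set(fresult))
--     counter = [fresult.count(f) for f in houxuanf]
--     selected_f = []
--     for c in houxuanf:
--         if fresult.count(c) == max(counter):
--             selected_f.append(c)
--     # 若经过筛选只剩一个交叉候选行业，则直接返回：
--     if len(selected_f) == 1:
--         return selected_f[-1]
--     else:
--         return 0
-- ===== SOURCE B (Python) =====
-- def choose_multi_firstcategory(fresult):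
--     counts = {}
--     for x in fresult:
--         counts[x] = counts.get(x, 0) + 1
--     best, best_cnt, unique = 0, 0, False
--     for k, c in counts.items():
--         if c > best_cnt:
--             best, best_cnt, unique = k, c, True
--         elif c == best_cnt:
--             unique = False
--     return best if unique else 0
-- ===== Notes on version B (the rewrite author's own statement) =====
-- stated objective: faster
-- what changed: B replaces A's per-distinct-element fresult.count scans, per-iteration max(counter) recomputation and max-set collection with one dict counting pass followed by a single argmax-with-uniqueness-flag scan over the distinct counts.
import Mathlib
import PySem

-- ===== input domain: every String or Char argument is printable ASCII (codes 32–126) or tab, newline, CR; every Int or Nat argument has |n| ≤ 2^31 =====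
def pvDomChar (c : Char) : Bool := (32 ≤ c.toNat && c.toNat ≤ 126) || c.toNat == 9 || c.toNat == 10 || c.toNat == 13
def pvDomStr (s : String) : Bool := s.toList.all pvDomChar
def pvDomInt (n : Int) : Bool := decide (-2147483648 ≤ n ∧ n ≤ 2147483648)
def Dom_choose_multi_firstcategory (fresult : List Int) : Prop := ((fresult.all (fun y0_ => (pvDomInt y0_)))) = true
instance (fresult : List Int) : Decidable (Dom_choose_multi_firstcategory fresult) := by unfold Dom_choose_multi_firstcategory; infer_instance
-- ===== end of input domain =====

-- B replaces A's repeated .count scans and per-iteration max() recomputation by one counting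
-- pass over the list and one argmax/uniqueness scan over the distinct counts (objective: faster).

-- ===== PORT A =====
def choose_multi_firstcategory (fresult : List Int) : Int :=
  let houxuanf : List Int := PySem.Set.ofList fresult
  let counter : List Int := houxuanf.map (fun f => (PySem.List.count fresult f : Int))
  let selected_f : List Int := houxuanf.foldl
    (fun acc c =>
      if some ((PySem.List.count fresult c : Int)) = PySem.List.max? counter (fun y => y)
      then acc ++ [c] else acc) []
  if selected_f.length = 1 then (PySem.List.pyGet? selected_f (-1)).getD 0 else 0

-- ===== PORT B =====
-- one step of Source B's second loop (over counts.items())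
def pvStep (s : Int × Int × Bool) (kc : Int × Int) : Int × Int × Bool :=
  if kc.2 > s.2.1 then (kc.1, kc.2, true)
  else if kc.2 = s.2.1 then (s.1, s.2.1, false)
  else s

def choose_multi_firstcategory_alt (fresult : List Int) : Int :=
  let counts : PySem.Dict Int Int :=
    fresult.foldl (fun d x => d.insert x (d.getD x 0 + 1)) PySem.Dict.empty
  let r : Int × Int × Bool := counts.items.foldl pvStep (0, 0, false)
  if r.2.2 then r.1 else 0

-- ===== PRECONDITION & SPEC =====
def Spec_choose_multi_firstcategory (fresult : List Int) (out : Int) : Prop := out = choose_multi_firstcategory_alt fresult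
instance (fresult : List Int) (out : Int) : Decidable (Spec_choose_multi_firstcategory fresult out) := by unfold Spec_choose_multi_firstcategory; infer_instance

-- ===== CLAIM (what is proved, stated in full; the proofs are below) =====
def Claim_equal_choose_multi_firstcategory : Prop := ∀ (fresult : List Int), Dom_choose_multi_firstcategory fresult → Spec_choose_multi_firstcategory fresult (choose_multi_firstcategory fresult)

-- ===== LEMMAS AND PROOFS =====

-- foldl max attains its value (or stays at the seed)
lemma pv_foldl_max_mem (l : List Int) (a : Int) :
    l.foldl max a = a ∨ l.foldl max a ∈ l := by
  induction l generalizing a with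
  | nil => exact Or.inl rfl
  | cons x t ih =>
    simp only [List.foldl_cons]
    rcases ih (max a x) with h | h
    · rcases max_choice a x with hm | hm
      · exact Or.inl (h.trans hm)
      · exact Or.inr (by rw [h, hm]; exact List.mem_cons_self)
    · exact Or.inr (List.mem_cons_of_mem _ h)

-- find? is the head of the filter
lemma pv_find?_eq_head?_filter {α : Type} (p : α → Bool) (l : List α) :
    l.find? p = (l.filter p).head? := by
  induction l with
  | nil => rfl
  | cons x t ih =>
    cases hx : p x with
    | true => rw [List.find?_cons_of_pos hx, List.filter_cons_of_pos hx]; rfl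
    | false =>
      rw [List.find?_cons_of_neg (by simp [hx]), List.filter_cons_of_neg (by simp [hx])]
      exact ih

-- invariant of Source B's scan over the (key, count) pairs
lemma pv_step_invariant (ps : List (Int × Int)) (hpos : ∀ p ∈ ps, 1 ≤ p.2) (hne : ps ≠ []) :
    (ps.foldl pvStep (0, 0, false)).2.1 = (ps.map Prod.snd).foldl max 0 ∧
    ((ps.foldl pvStep (0, 0, false)).2.2 = true ↔
        ps.countP (fun p => p.2 == (ps.map Prod.snd).foldl max 0) = 1) ∧
    ((ps.foldl pvStep (0, 0, false)).2.2 = true →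
        ps.find? (fun p => p.2 == (ps.map Prod.snd).foldl max 0)
          = some ((ps.foldl pvStep (0, 0, false)).1, (ps.map Prod.snd).foldl max 0)) := by
  induction ps using List.reverseRecOn with
  | nil => exact absurd rfl hne
  | append_singleton ps p ih =>
    obtain ⟨k, c⟩ := p
    have hc : (1 : Int) ≤ c := hpos (k, c) (by simp)
    rcases eq_or_ne ps [] with hps | hps
    · subst hps
      have hc0 : (0 : Int) < c := by omega
      simp [pvStep, hc0, max_eq_right hc0.le]
    · have hpos' : ∀ p ∈ ps, 1 ≤ p.2 := fun p hp => hpos p (by simp [hp])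
      obtain ⟨hM, hu, hb⟩ := ih hpos' hps
      set M : Int := (ps.map Prod.snd).foldl max 0 with hMdef
      set r : Int × Int × Bool := ps.foldl pvStep (0, 0, false) with hrdef
      -- M is attained in ps
      have hMmem : M ∈ ps.map Prod.snd := by
        rcases pv_foldl_max_mem (ps.map Prod.snd) 0 with h0 | h0
        · exfalso
          obtain ⟨q, hq⟩ := List.exists_mem_of_ne_nil ps hps
          have := hpos' q hq
          have hle := (PySem.List.le_foldl_max (ps.map Prod.snd) 0).2 q.2
            (List.mem_map_of_mem hq)
          omega
        · exact h0
      have hMpos : (1 : Int) ≤ M := by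
        obtain ⟨q, hq, hq2⟩ := List.mem_map.mp hMmem
        have := hpos' q hq
        omega
      have hle : ∀ y ∈ ps.map Prod.snd, y ≤ M :=
        (PySem.List.le_foldl_max (ps.map Prod.snd) 0).2
      have hfold : (ps ++ [(k, c)]).foldl pvStep (0, 0, false) = pvStep r (k, c) := by
        rw [List.foldl_append]; rfl
      have hM' : ((ps ++ [(k, c)]).map Prod.snd).foldl max 0 = max M c := by
        simp [List.foldl_append, hMdef]
      rcases lt_trichotomy M c with hlt | heq | hgt
      · -- new strict maximum c
        have hmax : max M c = c := max_eq_right hlt.le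
        have hstep : pvStep r (k, c) = (k, c, true) := by
          unfold pvStep; rw [hM]
          simp only [if_pos hlt]
        have hcount0 : ps.countP (fun p => p.2 == c) = 0 := by
          rw [List.countP_eq_zero]
          intro q hq
          have := hle q.2 (List.mem_map_of_mem hq)
          simp only [beq_iff_eq]
          omega
        have hfind0 : ps.find? (fun p => p.2 == c) = none := by
          rw [List.find?_eq_none]
          intro q hq
          have := hle q.2 (List.mem_map_of_mem hq)
          simp only [beq_iff_eq]
          omega
        refine ⟨?_, ?_, ?_⟩
        · rw [hfold, hstep, hM', hmax]
        · rw [hfold, hstep, hM', hmax, List.countP_append, hcount0]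
          simp
        · intro _
          rw [hfold, hstep, hM', hmax, List.find?_append, hfind0]
          simp
      · -- tie with the old maximum
        have hmax : max M c = M := by omega
        have hstep : pvStep r (k, c) = (r.1, M, false) := by
          unfold pvStep; rw [hM]
          rw [if_neg (by omega), if_pos heq.symm]
        have hcount1 : 0 < ps.countP (fun p => p.2 == M) := by
          obtain ⟨q, hq, hq2⟩ := List.mem_map.mp hMmem
          exact List.countP_pos_iff.mpr ⟨q, hq, by simp [hq2]⟩
        have hcM : List.countP (fun p => p.2 == M) [(k, c)] = 1 := by
          simp [← heq]
        refine ⟨?_, ?_, ?_⟩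
        · rw [hfold, hstep, hM', hmax]
        · rw [hfold, hstep, hM', hmax, List.countP_append, hcM]
          simp only [Bool.false_eq_true, false_iff]
          omega
        · intro h
          exact absurd h (by simp [hfold, hstep])
      · -- smaller than the old maximum: state unchanged
        have hmax : max M c = M := max_eq_left hgt.le
        have hstep : pvStep r (k, c) = r := by
          unfold pvStep; rw [hM]
          rw [if_neg (by omega), if_neg (by omega)]
        have hcM : List.countP (fun p => p.2 == M) [(k, c)] = 0 := by
          simp only [List.countP_cons, List.countP_nil, beq_iff_eq]
          rw [if_neg (by omega)]
        refine ⟨?_, ?_, ?_⟩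
        · rw [hfold, hstep, hM', hmax]; exact hM
        · rw [hfold, hstep, hM', hmax, List.countP_append, hcM]
          simpa using hu
        · intro h
          rw [hfold, hstep] at h ⊢
          rw [hM', hmax, List.find?_append, hb h]
          simp

theorem pv_main (fresult : List Int) :
    choose_multi_firstcategory fresult = choose_multi_firstcategory_alt fresult := by
  unfold choose_multi_firstcategory choose_multi_firstcategory_alt
  dsimp only
  rw [PySem.Dict.foldl_insert_getD_add_one_eq_counter, PySem.Dict.items_counter]
  cases hks : PySem.Set.ofList fresult with
  | nil => rfl
  | cons k t =>
    -- abbreviations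
    set cnt : Int → Int := fun x => ((List.count x fresult : Nat) : Int) with hcnt
    have hcount : ∀ x, ((PySem.List.count fresult x : Nat) : Int) = cnt x := by
      intro x; rw [PySem.List.count_eq]
    have hposk : ∀ x ∈ (k :: t), 1 ≤ cnt x := by
      intro x hx
      have hxf : x ∈ fresult := (PySem.Set.mem_ofList fresult x).mp (hks ▸ hx)
      have := List.count_pos_iff.mpr hxf
      simp only [hcnt]
      omega
    -- A's max(counter)
    have hmaxA : PySem.List.max? ((k :: t).map (fun f => ((PySem.List.count fresult f : Nat) : Int))) (fun y => y)
        = some (((k :: t).map cnt).foldl max 0) := by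
      have h1 : ((k :: t).map (fun f => ((PySem.List.count fresult f : Nat) : Int))) = (cnt k) :: t.map cnt := by
        exact List.map_congr_left (fun x _ => hcount x)
      rw [h1, PySem.List.max?_id_cons]
      have hk1 : (1 : Int) ≤ cnt k := hposk k (by simp)
      have : max 0 (cnt k) = cnt k := by omega
      simp [List.foldl_cons, this]
    set M : Int := (((k :: t)).map cnt).foldl max 0 with hMdef
    -- A's selected list is a filter
    have hsel : ((k :: t)).foldl
        (fun acc c => if some ((PySem.List.count fresult c : Nat) : Int)
            = PySem.List.max? ((k :: t).map (fun f => ((PySem.List.count fresult f : Nat) : Int))) (fun y => y)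
          then acc ++ [c] else acc) []
        = (k :: t).filter (fun c => cnt c == M) := by
      rw [PySem.List.foldl_append_ite_eq_filter]
      simp only [List.nil_append]
      apply List.filter_congr
      intro x _
      rw [hmaxA, hcount]
      exact decide_eq_decide.mpr Option.some_inj
    -- B's pairs
    set ps : List (Int × Int) := (k :: t).map (fun x => (x, cnt x)) with hps
    have hsnd : ps.map Prod.snd = (k :: t).map cnt := by
      simp [hps, Function.comp]
    have hpos : ∀ p ∈ ps, 1 ≤ p.2 := by
      intro p hp
      obtain ⟨x, hx, rfl⟩ := List.mem_map.mp hp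
      exact hposk x hx
    obtain ⟨hM, hu, hb⟩ := pv_step_invariant ps hpos (by simp [hps])
    rw [hsnd, ← hMdef] at hM hu hb
    set r : Int × Int × Bool := ps.foldl pvStep (0, 0, false) with hrdef
    rw [hsel]
    -- relate A's filter to B's verdict
    have hcountP : ((k :: t).filter (fun c => cnt c == M)).length
        = ps.countP (fun p => p.2 == M) := by
      rw [← List.countP_eq_length_filter, hps, List.countP_map]
      rfl
    by_cases hone : ((k :: t).filter (fun c => cnt c == M)).length = 1
    · obtain ⟨a, ha⟩ := List.length_eq_one_iff.mp hone
      have hutrue : r.2.2 = true := hu.mpr (by rw [← hcountP, hone])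
      have hfindks : (k :: t).find? (fun c => cnt c == M) = some a := by
        rw [pv_find?_eq_head?_filter, ha]; rfl
      have hfindps : ps.find? (fun p => p.2 == M) = some (a, cnt a) := by
        rw [hps, List.find?_map]
        have : ((fun p : Int × Int => p.2 == M) ∘ fun x => (x, cnt x)) = (fun c => cnt c == M) := rfl
        rw [this, hfindks]
        rfl
      have hra : r.1 = a := by
        have := hb hutrue
        rw [hfindps] at this
        exact (Prod.mk.injEq _ _ _ _ ▸ (Option.some.injEq _ _ ▸ this)).1.symm
      rw [if_pos hone, ha, if_pos hutrue, hra]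
      rfl
    · have hufalse : r.2.2 = false := by
        rcases Bool.eq_false_or_eq_true r.2.2 with h | h
        · exact absurd (hcountP ▸ hu.mp h) hone
        · exact h
      rw [if_neg hone, hufalse]
      rfl

-- ===== VERDICT (by name: the statement is the Claim_ definition above) =====
theorem choose_multi_firstcategory_spec : Claim_equal_choose_multi_firstcategory := by
  intro fresult _
  unfold Spec_choose_multi_firstcategory
  exact pv_main fresult
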